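-- pv_equiv track=rewrite | github.com/prishni/debug-louvain | CompMod/common.py | range_to_pair
-- ===== SOURCE A (Python) =====
-- def range_to_pair(rnglist):
--     '''[10, 5, 10] --> [(0, 10), (10, 15), (15, 25)]'''
--     base = 0
--     r_pair = []
--     for rng in rnglist:
--         upper = base + rng
--         r_pair.append(tuple([base, upper]))
--         base = upper
--     return r_pair
-- ===== SOURCE B (Python) =====
-- def range_to_pair(rnglist):
--     '''[10, 5, 10] --> [(0, 10), (10, 15), (15, 25)]'''
--     bounds = [0]
--     for rng in rnglist:
--         bounds.append(bounds[-1] + rng)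
--     return list(zip(bounds, bounds[1:]))
-- ===== Notes on version B (the rewrite author's own statement) =====
-- stated objective: alternative
-- what changed: Replaces the running-accumulator loop that emits pairs directly with a two-phase build: first the full cumulative boundary list via prefix sums, then pairing consecutive boundaries with zip.
import Mathlib
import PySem

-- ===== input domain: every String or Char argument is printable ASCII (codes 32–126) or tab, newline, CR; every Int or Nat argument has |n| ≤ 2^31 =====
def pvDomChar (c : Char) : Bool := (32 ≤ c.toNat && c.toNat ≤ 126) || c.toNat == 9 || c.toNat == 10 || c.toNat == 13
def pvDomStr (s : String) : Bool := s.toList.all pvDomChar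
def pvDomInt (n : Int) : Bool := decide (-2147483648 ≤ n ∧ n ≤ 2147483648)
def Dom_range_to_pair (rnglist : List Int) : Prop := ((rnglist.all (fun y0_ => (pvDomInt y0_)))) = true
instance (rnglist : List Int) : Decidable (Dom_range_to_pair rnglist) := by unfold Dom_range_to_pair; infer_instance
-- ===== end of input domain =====

-- B builds the cumulative boundary list first and zips consecutive boundaries,
-- instead of A's running-accumulator loop emitting pairs directly (alternative decomposition, same cost).

-- ===== PORT A =====
-- base = 0; r_pair = []; for rng: upper = base+rng; append (base, upper); base = upper
def range_to_pair (rnglist : List Int) : List (Int × Int) :=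
  (rnglist.foldl
    (fun (st : Int × List (Int × Int)) rng =>
      let upper := st.1 + rng
      (upper, st.2 ++ [(st.1, upper)]))
    (0, [])).2

-- ===== PORT B =====
-- bounds = [0]; for rng: bounds.append(bounds[-1] + rng)  (bounds[-1] of a nonempty list = getLast!)
def rtpBounds (rnglist : List Int) : List Int :=
  rnglist.foldl (fun bounds rng => bounds ++ [bounds.getLast! + rng]) [0]

-- list(zip(bounds, bounds[1:]))
def range_to_pair_alt (rnglist : List Int) : List (Int × Int) :=
  (rtpBounds rnglist).zip (rtpBounds rnglist).tail

-- ===== PRECONDITION & SPEC =====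
def Spec_range_to_pair (rnglist : List Int) (out : List (Int × Int)) : Prop := out = range_to_pair_alt rnglist
instance (rnglist : List Int) (out : List (Int × Int)) : Decidable (Spec_range_to_pair rnglist out) := by unfold Spec_range_to_pair; infer_instance

-- ===== CLAIM (what is proved, stated in full; the proofs are below) =====
def Claim_equal_range_to_pair : Prop := ∀ (rnglist : List Int), Dom_range_to_pair rnglist → Spec_range_to_pair rnglist (range_to_pair rnglist)

-- ===== LEMMAS AND PROOFS =====

-- ===== VERDICT (by name: the statement is the Claim_ definition above) =====
-- reference pair list starting from a given base
def rtpPairs (base : Int) : List Int → List (Int × Int)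
  | [] => []
  | rng :: l => (base, base + rng) :: rtpPairs (base + rng) l

-- reference boundary tail starting from a given base
def rtpTail (base : Int) : List Int → List Int
  | [] => []
  | rng :: l => (base + rng) :: rtpTail (base + rng) l

theorem rtpA_eq (l : List Int) : ∀ (base : Int) (acc : List (Int × Int)),
    (l.foldl (fun (st : Int × List (Int × Int)) rng =>
        let upper := st.1 + rng
        (upper, st.2 ++ [(st.1, upper)])) (base, acc)).2 = acc ++ rtpPairs base l := by
  induction l with
  | nil => intro base acc; simp [rtpPairs]
  | cons rng l ih => intro base acc; simp [List.foldl, rtpPairs, ih]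

theorem rtpB_eq (l : List Int) : ∀ (base : Int) (pre : List Int),
    l.foldl (fun bounds rng => bounds ++ [bounds.getLast! + rng]) (pre ++ [base]) =
      pre ++ base :: rtpTail base l := by
  induction l with
  | nil => intro base pre; simp [rtpTail]
  | cons rng l ih =>
    intro base pre
    have h : (pre ++ [base]).getLast! = base := by
      simp [List.getLast!_eq_getLast?_getD, List.getLast?_append]
    simp only [List.foldl, h, rtpTail]
    have := ih (base + rng) (pre ++ [base])
    simpa using this

theorem rtp_zip (l : List Int) : ∀ (base : Int),
    (base :: rtpTail base l).zip (rtpTail base l) = rtpPairs base l := by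
  induction l with
  | nil => intro base; simp [rtpTail, rtpPairs]
  | cons rng l ih => intro base; simpa [rtpTail, rtpPairs, List.zip] using ih (base + rng)

theorem range_to_pair_spec : Claim_equal_range_to_pair := by
  intro rnglist _
  unfold Spec_range_to_pair range_to_pair range_to_pair_alt rtpBounds
  have hB := rtpB_eq rnglist 0 []
  simp only [List.nil_append] at hB
  rw [rtpA_eq, hB]
  simp [rtp_zip]
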